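-- pv_equiv track=rewrite | github.com/MKXX47/ADFGVX_cipher | adfgvx.py | substituer_message
-- ===== SOURCE A (Python) =====
-- def substituer_message(dict_subst, message):
--     """
--     Chiffre le message en substituant chaque lettre ou chiffre par son digramme ADFGVX.
--     Les autres caractères sont éliminés.
--     :param dict_subst: le dictionnaire de substitution
--     :type dict_subst: dict {str: str}
--     :param message: le message à chiffrer
--     :type message: str
--     :return: le message chiffré
--     """
--     message_chiffre = ""
--     for cle in dict_subst.keys():
--         for i in message:
--             if cle == i:
--                 message_chiffre += dict_subst[cle] + " "
--             else:
--                 pass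
--     return message_chiffre
-- ===== SOURCE B (Python) =====
-- def substituer_message(dict_subst, message):
--     counts = {}
--     for ch in message:
--         counts[ch] = counts.get(ch, 0) + 1
--     return "".join((dict_subst[cle] + " ") * counts.get(cle, 0) for cle in dict_subst)
-- ===== Notes on version B (the rewrite author's own statement) =====
-- stated objective: faster
-- what changed: B builds a character-frequency dict over the message in one pass and emits each key's digram repeated by its count, instead of A's rescan of the entire message for every dictionary key.
import Mathlib
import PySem

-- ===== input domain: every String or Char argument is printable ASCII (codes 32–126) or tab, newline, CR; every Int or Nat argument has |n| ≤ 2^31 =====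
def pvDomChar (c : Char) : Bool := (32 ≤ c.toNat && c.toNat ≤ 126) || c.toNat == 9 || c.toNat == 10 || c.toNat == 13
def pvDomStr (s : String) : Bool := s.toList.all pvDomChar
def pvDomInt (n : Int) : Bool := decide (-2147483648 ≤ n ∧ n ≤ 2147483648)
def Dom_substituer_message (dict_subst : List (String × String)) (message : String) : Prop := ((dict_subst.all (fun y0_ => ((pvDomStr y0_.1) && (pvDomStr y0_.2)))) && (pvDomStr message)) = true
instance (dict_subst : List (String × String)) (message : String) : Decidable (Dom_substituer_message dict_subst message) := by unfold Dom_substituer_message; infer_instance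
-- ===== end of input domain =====

-- B counts each character's occurrences once and emits every key's digram repeated by
-- that count, replacing A's rescan of the whole message for every key (objective: faster).

-- ===== PORT A =====
def substituer_message (dict_subst : List (String × String)) (message : String) : String :=
  let d := PySem.Dict.ofList dict_subst
  d.keys.foldl (fun message_chiffre cle =>
      message.toList.foldl (fun acc i =>
          if cle == String.mk [i] then acc ++ (d.getD cle "" ++ " ") else acc)
        message_chiffre)
    ""

-- ===== PORT B =====
-- Python's  s * n  for a string and an int (negative n gives "")
def pyStrMul (s : String) (n : Int) : String :=
  String.join (List.replicate n.toNat s)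

def substituer_message_alt (dict_subst : List (String × String)) (message : String) : String :=
  let d := PySem.Dict.ofList dict_subst
  let counts := message.toList.foldl
      (fun (c : PySem.Dict String Int) ch => c.modify (String.mk [ch]) 0 (· + 1))
      PySem.Dict.empty
  String.join (d.keys.map (fun cle => pyStrMul (d.getD cle "" ++ " ") (counts.getD cle 0)))

-- ===== PRECONDITION & SPEC =====
def Spec_substituer_message (dict_subst : List (String × String)) (message : String) (out : String) : Prop := out = substituer_message_alt dict_subst message
instance (dict_subst : List (String × String)) (message : String) (out : String) : Decidable (Spec_substituer_message dict_subst message out) := by unfold Spec_substituer_message; infer_instance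

-- ===== CLAIM (what is proved, stated in full; the proofs are below) =====
def Claim_equal_substituer_message : Prop := ∀ (dict_subst : List (String × String)) (message : String), Dom_substituer_message dict_subst message → Spec_substituer_message dict_subst message (substituer_message dict_subst message)

-- ===== LEMMAS AND PROOFS =====

-- folding string append from any accumulator
theorem pv_foldl_str (l : List String) (a : String) :
    List.foldl (fun r s => r ++ s) a l = a ++ List.foldl (fun r s => r ++ s) "" l := by
  induction l generalizing a with
  | nil => simp
  | cons x l ih =>
    simp only [List.foldl_cons, String.empty_append]
    rw [ih, ih x, String.append_assoc]

theorem pv_join_cons (x : String) (l : List String) :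
    String.join (x :: l) = x ++ String.join l := by
  simp only [String.join, List.foldl_cons, String.empty_append]
  exact pv_foldl_str l x

-- A's inner loop over the message appends v once per matching character
theorem pv_inner_foldl (cle v : String) (cs : List Char) (acc : String) :
    cs.foldl (fun acc i => if cle == String.mk [i] then acc ++ v else acc) acc
      = acc ++ String.join (List.replicate (cs.countP (fun i => cle == String.mk [i])) v) := by
  induction cs generalizing acc with
  | nil => simp [String.join]
  | cons c cs ih =>
    simp only [List.foldl_cons, List.countP_cons]
    by_cases h : (cle == String.mk [c]) = true
    · rw [ih]
      simp only [h, if_true, List.replicate_succ, pv_join_cons, String.append_assoc]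
    · rw [ih]
      simp [h]

-- folding "append g k" over a list is joining the mapped list
theorem pv_foldl_append_join (g : String → String) (ks : List String) (acc : String) :
    ks.foldl (fun a k => a ++ g k) acc = acc ++ String.join (ks.map g) := by
  induction ks generalizing acc with
  | nil => simp [String.join]
  | cons k ks ih =>
    simp only [List.foldl_cons, List.map_cons]
    rw [ih, pv_join_cons, String.append_assoc]

-- ===== VERDICT (by name: the statement is the Claim_ definition above) =====
theorem substituer_message_spec : Claim_equal_substituer_message := by
  intro dict_subst message _
  unfold Spec_substituer_message substituer_message substituer_message_alt
  simp only [pv_inner_foldl, pv_foldl_append_join]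
  have hc : ∀ cle : String,
      (message.toList.foldl
        (fun (c : PySem.Dict String Int) ch => c.modify (String.mk [ch]) 0 (· + 1))
        PySem.Dict.empty).getD cle 0
      = ((message.toList.map (fun ch => String.mk [ch])).count cle : Int) := by
    intro cle
    rw [← List.foldl_map (f := fun ch => String.mk [ch])
        (g := fun (c : PySem.Dict String Int) x => c.modify x 0 (· + 1)),
      PySem.Dict.getD_foldl_modify_add_one]
    simp
  simp only [hc, String.empty_append]
  congr 1
  apply List.map_congr_left
  intro cle _
  simp only [pyStrMul]
  congr 2
  rw [Int.toNat_natCast, List.count_eq_countP, List.countP_map]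
  apply List.countP_congr
  intro i _
  simp only [Function.comp_apply]
  rw [Bool.eq_iff_iff]
  simp only [beq_iff_eq]
  constructor
  · intro h
    exact (h.mpr trivial).symm
  · intro h
    exact iff_of_true h.symm trivial
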